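-- pv_equiv track=rewrite | github.com/spunkx/ScrapingProject | Integration/server.py | matchEntities
-- ===== SOURCE A (Python) =====
-- def matchEntities(rankedAngles, entitIds):
--     matchedEntities = []
--     pairedEntities = []
--     for i in range(len(entitIds)):
--         for j in range(len(rankedAngles)):
--             if(i == rankedAngles[j][0]):
--                 matchedEntities.append((rankedAngles[j][0], rankedAngles[j][1][0], rankedAngles[j][1]))
--     return matchedEntities
-- ===== SOURCE B (Python) =====
-- def matchEntities(rankedAngles, entitIds):
--     buckets = {}
--     for k, angles in rankedAngles:
--         buckets.setdefault(k, []).append(angles)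
--     out = []
--     for i in range(len(entitIds)):
--         for angles in buckets.get(i, []):
--             out.append((i, angles[0], angles))
--     return out
-- ===== Notes on version B (the rewrite author's own statement) =====
-- stated objective: faster
-- what changed: Replaces the nested scan (for every index i, rescan all of rankedAngles) by one pass that buckets the angle lists by their key into a dict, then one pass over the indices concatenating each bucket.
import Mathlib
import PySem

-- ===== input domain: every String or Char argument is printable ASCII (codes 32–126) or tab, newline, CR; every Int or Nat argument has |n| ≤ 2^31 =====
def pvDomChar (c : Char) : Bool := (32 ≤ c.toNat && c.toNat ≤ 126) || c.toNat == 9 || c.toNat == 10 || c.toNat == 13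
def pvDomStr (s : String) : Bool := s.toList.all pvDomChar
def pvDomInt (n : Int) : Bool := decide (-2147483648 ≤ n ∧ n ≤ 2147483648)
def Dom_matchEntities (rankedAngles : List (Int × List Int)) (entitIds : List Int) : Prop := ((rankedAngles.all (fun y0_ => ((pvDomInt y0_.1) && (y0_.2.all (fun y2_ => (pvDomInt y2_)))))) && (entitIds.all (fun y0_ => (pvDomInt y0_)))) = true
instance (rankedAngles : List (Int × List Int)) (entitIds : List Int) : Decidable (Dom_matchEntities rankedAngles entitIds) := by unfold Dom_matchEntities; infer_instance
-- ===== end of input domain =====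

-- B buckets the angle lists by key in one pass and reads the buckets off in index order,
-- instead of A's rescan of rankedAngles for every index (objective: faster, asymptotic).

-- ===== PORT A =====
-- literal port of A's nested index loops; rankedAngles[j] is repeated per access as in the source.
-- 'rankedAngles[j][1][0]' is PySem.List.pyGetD … 0 0: exact under Pre_ (the matched list is nonempty).
def matchEntities (rankedAngles : List (Int × List Int)) (entitIds : List Int) : List (Int × Int × List Int) :=
  (PySem.List.pyRange 0 (PySem.List.len entitIds)).foldl (fun matched i =>
    (PySem.List.pyRange 0 (PySem.List.len rankedAngles)).foldl (fun matched j =>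
      if i = (PySem.List.pyGetD rankedAngles j (0, [])).1 then
        matched ++ [((PySem.List.pyGetD rankedAngles j (0, [])).1,
                     PySem.List.pyGetD (PySem.List.pyGetD rankedAngles j (0, [])).2 0 0,
                     (PySem.List.pyGetD rankedAngles j (0, [])).2)]
      else matched) matched) []

-- ===== PORT B =====
-- literal port of Source B: setdefault(k, []).append(angles) is Dict.modify k [] (· ++ [angles]);
-- 'angles[0]' is PySem.List.pyGetD angles 0 0: exact under Pre_ (bucketed lists read off are nonempty).
def matchEntities_alt (rankedAngles : List (Int × List Int)) (entitIds : List Int) : List (Int × Int × List Int) :=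
  let buckets : PySem.Dict Int (List (List Int)) :=
    rankedAngles.foldl (fun d p => d.modify p.1 [] (fun l => l ++ [p.2])) PySem.Dict.empty
  (PySem.List.pyRange 0 (PySem.List.len entitIds)).foldl (fun out i =>
    (buckets.getD i []).foldl (fun out angles =>
      out ++ [(i, PySem.List.pyGetD angles 0 0, angles)]) out) []

-- ===== PRECONDITION & SPEC =====
-- Pre_ excludes exactly the inputs on which Python A raises IndexError: an entry whose key is a
-- valid index into entitIds but whose angle list is empty (then rankedAngles[j][1][0] raises).
def Pre_matchEntities (rankedAngles : List (Int × List Int)) (entitIds : List Int) : Prop :=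
  ∀ p ∈ rankedAngles, (0 ≤ p.1 ∧ p.1 < (entitIds.length : Int)) → p.2 ≠ []
instance (rankedAngles : List (Int × List Int)) (entitIds : List Int) : Decidable (Pre_matchEntities rankedAngles entitIds) := by unfold Pre_matchEntities; infer_instance
def pvWitness_matchEntities : (List (Int × List Int)) × List Int := ([(0, [5, 6]), (2, [7]), (0, [9])], [10, 20, 30])
def Spec_matchEntities (rankedAngles : List (Int × List Int)) (entitIds : List Int) (out : List (Int × Int × List Int)) : Prop := out = matchEntities_alt rankedAngles entitIds
instance (rankedAngles : List (Int × List Int)) (entitIds : List Int) (out : List (Int × Int × List Int)) : Decidable (Spec_matchEntities rankedAngles entitIds out) := by unfold Spec_matchEntities; infer_instance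

-- ===== CLAIM (what is proved, stated in full; the proofs are below) =====
def Claim_equal_matchEntities : Prop := ∀ (rankedAngles : List (Int × List Int)) (entitIds : List Int), Dom_matchEntities rankedAngles entitIds → Pre_matchEntities rankedAngles entitIds → Spec_matchEntities rankedAngles entitIds (matchEntities rankedAngles entitIds)

-- ===== LEMMAS AND PROOFS =====

-- per-index agreement: A's filtered scan for index i produces exactly B's bucket for i, mapped.
lemma bucket_eq (ra : List (Int × List Int)) (i : Int) :
    ((ra.filter (fun p => p.1 == i)).map (fun p => p.2)).map
        (fun angles => (i, PySem.List.pyGetD angles 0 0, angles)) =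
      (ra.filter (fun p : Int × List Int => decide (i = p.1))).map
        (fun p => (p.1, PySem.List.pyGetD p.2 0 0, p.2)) := by
  rw [List.map_map]
  have hf : ra.filter (fun p => p.1 == i) = ra.filter (fun p : Int × List Int => decide (i = p.1)) := by
    apply List.filter_congr
    intro p _
    by_cases h : i = p.1
    · simp [h]
    · simp [h, Ne.symm h]
  rw [hf]
  apply List.map_congr_left
  intro p hp
  have : i = p.1 := by
    have := List.of_mem_filter hp
    simpa using this
  simp [this]

-- ===== VERDICT (by name: the statement is the Claim_ definition above) =====

theorem matchEntities_spec : Claim_equal_matchEntities := by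
  intro ra eids _ _
  unfold Spec_matchEntities matchEntities matchEntities_alt

  apply PySem.List.foldl_congr_mem
  intro acc i _
  rw [PySem.List.foldl_pyRange_pyGetD ra ((0 : Int), ([] : List Int))
        (fun matched p => if i = p.1 then
            matched ++ [(p.1, PySem.List.pyGetD p.2 0 0, p.2)] else matched) acc (le_refl 0)]
  rw [Int.toNat_zero, List.drop_zero]
  rw [PySem.List.foldl_append_ite (p := fun p : Int × List Int => i = p.1)
        (f := fun p : Int × List Int => (p.1, PySem.List.pyGetD p.2 0 0, p.2))]
  rw [PySem.Dict.getD_foldl_modify_append ra PySem.Dict.empty i]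
  rw [PySem.Dict.getD_empty]
  rw [List.nil_append, PySem.List.foldl_append_singleton_eq_map, bucket_eq]
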